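-- pv_equiv track=rewrite | github.com/NorwegianVeterinaryInstitute/shinylims | src/shinylims/integrations/clarity_queries.py | _join_unique_non_empty
-- ===== SOURCE A (Python) =====
-- def _join_unique_non_empty(values: list[str | None]) -> str | None:
--     seen: set[str] = set()
--     items: list[str] = []
--     for value in values:
--         if value is None:
--             continue
--         text = str(value).strip()
--         if not text or text in seen:
--             continue
--         seen.add(text)
--         items.append(text)
--     return ", ".join(items) if items else None
-- ===== SOURCE B (Python) =====
-- def _join_unique_non_empty(values):
--     pending = [v.strip() for v in values if v is not None and v.strip()]
--     items = []
--     while pending: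
--         head = pending[0]
--         items.append(head)
--         pending = [t for t in pending[1:] if t != head]
--     return ", ".join(items) if items else None
-- ===== Notes on version B (the rewrite author's own statement) =====
-- stated objective: alternative
-- what changed: Deduplication no longer uses a seen-set with a membership branch in a single pass; B repeatedly takes the head of the remaining cleaned worklist and filters that value out of the rest, shrinking the input until it is empty.
import Mathlib
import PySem

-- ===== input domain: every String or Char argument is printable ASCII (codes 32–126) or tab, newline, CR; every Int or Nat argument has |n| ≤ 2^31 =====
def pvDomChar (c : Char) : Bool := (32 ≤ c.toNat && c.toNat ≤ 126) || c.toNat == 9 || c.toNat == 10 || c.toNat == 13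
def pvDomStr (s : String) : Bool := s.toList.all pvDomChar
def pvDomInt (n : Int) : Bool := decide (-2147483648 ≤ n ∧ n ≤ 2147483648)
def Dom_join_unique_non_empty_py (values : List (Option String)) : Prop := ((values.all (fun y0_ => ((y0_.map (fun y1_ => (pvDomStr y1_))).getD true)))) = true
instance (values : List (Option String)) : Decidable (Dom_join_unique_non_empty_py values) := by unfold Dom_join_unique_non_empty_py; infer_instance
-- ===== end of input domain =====

-- B drops A's seen-set/membership-branch pass: it cleans the values once, then
-- deduplicates by repeatedly taking the head of the remaining worklist and
-- filtering that value out of the rest (input-shrinking dedup; alternative, not faster).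

-- ===== PORT A =====
-- A's for-loop over values, carrying (seen, items) exactly as the Python does.
def joinLoopA : List (Option String) → PySem.Set String → List String → List String
  | [], _, items => items
  | none :: rest, seen, items => joinLoopA rest seen items
  | some value :: rest, seen, items =>
      let text := PySem.Str.strip value
      if text = "" ∨ PySem.Set.contains seen text then joinLoopA rest seen items
      else joinLoopA rest (PySem.Set.add seen text) (items ++ [text])

def join_unique_non_empty_py (values : List (Option String)) : Option String :=
  let items := joinLoopA values PySem.Set.empty []
  if items = [] then none else some (PySem.Str.join ", " items)

-- ===== PORT B =====
-- the cleaning comprehension: skip None, strip, drop empties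
def cleanB (values : List (Option String)) : List String :=
  values.filterMap (fun v => v.bind (fun s =>
    let t := PySem.Str.strip s
    if t = "" then none else some t))

-- B's while-loop: append the head, filter it out of the remaining worklist
def uniqLoop : List String → List String → List String
  | items, [] => items
  | items, head :: rest => uniqLoop (items ++ [head]) (rest.filter (fun t => t ≠ head))
termination_by _ pending => pending.length
decreasing_by
  simp
  calc (List.filter _ rest.attach).length ≤ rest.attach.length := List.length_filter_le _ _
    _ = rest.length := List.length_attach

def join_unique_non_empty_py_alt (values : List (Option String)) : Option String :=
  let items := uniqLoop [] (cleanB values)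
  if items = [] then none else some (PySem.Str.join ", " items)

-- ===== PRECONDITION & SPEC =====
def Spec_join_unique_non_empty_py (values : List (Option String)) (out : Option String) : Prop := out = join_unique_non_empty_py_alt values
instance (values : List (Option String)) (out : Option String) : Decidable (Spec_join_unique_non_empty_py values out) := by unfold Spec_join_unique_non_empty_py; infer_instance

-- ===== CLAIM (what is proved, stated in full; the proofs are below) =====
def Claim_equal_join_unique_non_empty_py : Prop := ∀ (values : List (Option String)), Dom_join_unique_non_empty_py values → Spec_join_unique_non_empty_py values (join_unique_non_empty_py values)

-- ===== LEMMAS AND PROOFS =====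

-- the cleaned stream both sides process
def cleanedOf (values : List (Option String)) : List String :=
  (((values.filterMap id).map PySem.Str.strip).filter (fun t => t ≠ ""))

theorem cleanB_eq_cleanedOf (values : List (Option String)) :
    cleanB values = cleanedOf values := by
  induction values with
  | nil => rfl
  | cons v rest ih =>
    cases v with
    | none => simpa [cleanB, cleanedOf] using ih
    | some s =>
      by_cases h : PySem.Str.strip s = "" <;>
        simp [cleanB, cleanedOf, h] at ih ⊢ <;> exact ih

-- A's loop, started with seen = items (as lists), folds Set.add over the cleaned stream.
theorem joinLoopA_eq_foldl (values : List (Option String)) (s : List String) :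
    joinLoopA values s s = (cleanedOf values).foldl PySem.Set.add s := by
  induction values generalizing s with
  | nil => simp [joinLoopA, cleanedOf]
  | cons v rest ih =>
    cases v with
    | none => simpa [joinLoopA, cleanedOf] using ih s
    | some value =>
      simp only [joinLoopA]
      by_cases h0 : PySem.Str.strip value = ""
      · rw [if_pos (Or.inl h0), ih s]
        simp [cleanedOf, h0]
      · by_cases hc : PySem.Set.contains s (PySem.Str.strip value) = true
        · have hm : PySem.Str.strip value ∈ s := by
            simpa [PySem.Set.contains] using hc
          rw [if_pos (Or.inr hc), ih s]
          simp [cleanedOf, h0, PySem.Set.add, hm]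
        · have hm : PySem.Str.strip value ∉ s := by
            simpa [PySem.Set.contains] using hc
          rw [if_neg (by simp [h0]; exact hm),
              show PySem.Set.add s (PySem.Str.strip value) = s ++ [PySem.Str.strip value] from
                by simp [PySem.Set.add, hm],
              ih (s ++ [PySem.Str.strip value])]
          simp [cleanedOf, h0, PySem.Set.add, hm]

-- adding once an element is present is a no-op, so already-seen values may be filtered out
theorem foldl_add_filter_mem (x : String) (xs : List String) (s : List String) (hx : x ∈ s) :
    xs.foldl PySem.Set.add s = (xs.filter (fun y => y ≠ x)).foldl PySem.Set.add s := by
  induction xs generalizing s with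
  | nil => rfl
  | cons y ys ih =>
    by_cases hyx : y = x
    · subst hyx
      have : PySem.Set.add s y = s := by simp [PySem.Set.add, PySem.Set.contains, hx]
      simp [this, ih s hx]
    · have hx' : x ∈ PySem.Set.add s y := by
        simp [PySem.Set.add]; split <;> simp [hx]
      simp [hyx, ih (PySem.Set.add s y) hx']

-- a head absent from the rest of the fold stays at the front
theorem foldl_add_cons (x : String) (s ys : List String) (h : ∀ y ∈ ys, y ≠ x) :
    ys.foldl PySem.Set.add (x :: s) = x :: ys.foldl PySem.Set.add s := by
  induction ys generalizing s with
  | nil => rfl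
  | cons y ys ih =>
    have hyx : y ≠ x := h y (by simp)
    have hadd : PySem.Set.add (x :: s) y = x :: PySem.Set.add s y := by
      simp [PySem.Set.add, PySem.Set.contains, hyx]
      split <;> simp
    simp [hadd, ih (PySem.Set.add s y) (fun z hz => h z (by simp [hz]))]

-- first-occurrence dedup peels off the head and discards its later copies
theorem dedup_cons_filter (x : String) (xs : List String) :
    PySem.List.dedup (x :: xs) = x :: PySem.List.dedup (xs.filter (fun y => y ≠ x)) := by
  have h1 : PySem.List.dedup (x :: xs) = xs.foldl PySem.Set.add [x] := by
    rw [PySem.List.dedup_eq_ofList, PySem.Set.ofList_eq_foldl]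
    simp [List.foldl, PySem.Set.add, PySem.Set.contains]
  have h2 : PySem.List.dedup (xs.filter (fun y => y ≠ x)) =
      (xs.filter (fun y => y ≠ x)).foldl PySem.Set.add [] := by
    rw [PySem.List.dedup_eq_ofList, PySem.Set.ofList_eq_foldl]
  rw [h1, h2, foldl_add_filter_mem x xs [x] (by simp),
      foldl_add_cons x [] _ (fun y hy => by simpa using (List.mem_filter.1 hy).2)]

-- B's worklist loop computes items ++ first-occurrence dedup of the worklist
theorem uniqLoop_eq_dedup (items pending : List String) :
    uniqLoop items pending = items ++ PySem.List.dedup pending := by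
  fun_induction uniqLoop items pending with
  | case1 items => simp [PySem.List.dedup, PySem.Set.ofList]
  | case2 items head rest ih =>
      rw [List.unattach_filter (g := fun t => decide (t ≠ head)) (hf := fun x h => rfl),
        List.unattach_attach] at ih
      rw [ih, dedup_cons_filter]
      simp

theorem join_unique_non_empty_py_eq (values : List (Option String)) :
    join_unique_non_empty_py values = join_unique_non_empty_py_alt values := by
  have hA : joinLoopA values PySem.Set.empty [] = PySem.List.dedup (cleanedOf values) := by
    rw [show (PySem.Set.empty : PySem.Set String) = [] from rfl, joinLoopA_eq_foldl values [],
        PySem.List.dedup_eq_ofList, PySem.Set.ofList_eq_foldl]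
  have hB : uniqLoop [] (cleanB values) = PySem.List.dedup (cleanedOf values) := by
    rw [uniqLoop_eq_dedup, cleanB_eq_cleanedOf]; simp
  unfold join_unique_non_empty_py join_unique_non_empty_py_alt
  rw [hA, hB]

-- ===== VERDICT (by name: the statement is the Claim_ definition above) =====
theorem join_unique_non_empty_py_spec : Claim_equal_join_unique_non_empty_py := by
  intro values _
  unfold Spec_join_unique_non_empty_py
  exact join_unique_non_empty_py_eq values
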